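-- pv_equiv track=rewrite | github.com/waf-iq/platePricesPredection | data/preproc.py | get_most_frequent_digits
-- ===== SOURCE A (Python) =====
-- from collections import Counter
--
-- def get_most_frequent_digits(number):
--     counter = Counter(str(number))
--
--     # Sort by frequency (desc), then by digit value (asc)
--     sorted_counts = sorted(counter.items(), key=lambda x: (-x[1], x[0]))
--
--     # Find the first non-zero digit for X
--     value_of_X, number_of_X = None, 0
--     for digit, count in sorted_counts:
--         if digit != "0":  # Skip 0
--             value_of_X, number_of_X = digit, count
--             break
--
--     # Find the next non-zero digit for Y
--     value_of_Y, number_of_Y = None, 0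
--     for digit, count in sorted_counts:
--         if digit != "0" and digit != value_of_X:  # Skip 0 and X
--             value_of_Y, number_of_Y = digit, count
--             break
--
--     return value_of_X, number_of_X, value_of_Y, number_of_Y
-- ===== SOURCE B (Python) =====
-- def get_most_frequent_digits(number):
--     counts = {}
--     for ch in str(number):
--         counts[ch] = counts.get(ch, 0) + 1
--     # single pass top-2 selection under (count desc, char asc); no sorting
--     best = (None, 0)
--     second = (None, 0)
--     for ch, n in counts.items():
--         if ch == "0":
--             continue
--         if best[0] is None or n > best[1] or (n == best[1] and ch < best[0]):
--             best, second = (ch, n), best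
--         elif second[0] is None or n > second[1] or (n == second[1] and ch < second[0]):
--             second = (ch, n)
--     return best[0], best[1], second[0], second[1]
-- ===== Notes on version B (the rewrite author's own statement) =====
-- stated objective: alternative
-- what changed: A sorts all counter items by (-count, char) and scans the sorted list twice with break-loops; B never sorts: it builds the count dict by hand and selects the top two non-'0' entries in a single fold that maintains (best, second) slots.
import Mathlib
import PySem

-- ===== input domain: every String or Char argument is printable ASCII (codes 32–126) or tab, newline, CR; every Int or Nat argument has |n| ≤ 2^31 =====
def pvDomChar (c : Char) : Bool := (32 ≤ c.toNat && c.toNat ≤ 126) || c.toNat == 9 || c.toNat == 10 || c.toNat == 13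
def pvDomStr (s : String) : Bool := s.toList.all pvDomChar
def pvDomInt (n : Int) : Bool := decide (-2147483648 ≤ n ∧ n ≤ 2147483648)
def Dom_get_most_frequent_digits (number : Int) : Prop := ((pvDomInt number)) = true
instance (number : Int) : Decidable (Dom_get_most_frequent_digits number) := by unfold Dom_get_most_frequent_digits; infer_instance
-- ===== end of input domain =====

-- B replaces A's sort-then-scan-twice by a hand-built count dict and ONE pass of top-2 selection
-- (no sorting at all); objective: alternative algorithm, linear selection instead of a sort.

-- ===== PORT A =====

-- first loop of A: first (digit, count) with digit != "0"
def pvFindX : List (String × Int) → Option String × Int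
  | [] => (none, 0)
  | (d, c) :: t => if d ≠ "0" then (some d, c) else pvFindX t

-- second loop of A: first (digit, count) with digit != "0" and digit != value_of_X
def pvFindY (x : Option String) : List (String × Int) → Option String × Int
  | [] => (none, 0)
  | (d, c) :: t => if d ≠ "0" ∧ some d ≠ x then (some d, c) else pvFindY x t

def get_most_frequent_digits (number : Int) : Option String × Int × Option String × Int :=
  let counter := PySem.Dict.counter ((PySem.Int.toStr number).toList.map (fun c => String.ofList [c]))
  let sorted_counts := PySem.List.sorted2 counter.items (fun x => -x.2) (fun x => x.1)
  let X := pvFindX sorted_counts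
  let Y := pvFindY X.1 sorted_counts
  (X.1, X.2, Y.1, Y.2)

-- ===== PORT B =====

-- 'x ranks before the stored entry e' under (count desc, char asc); e.1 = none means empty slot
-- (Python's short-circuit 'e[0] is None or n > e[1] or (n == e[1] and ch < e[0])')
def pvBeats (q : String × Int) (e : Option String × Int) : Bool :=
  match e.1 with
  | none => true
  | some b => decide (e.2 < q.2) || (q.2 == e.2 && decide (q.1 < b))

-- body of B's selection loop: state = (best, second)
def pvTopStep (st : (Option String × Int) × (Option String × Int)) (q : String × Int) :
    (Option String × Int) × (Option String × Int) :=
  if q.1 == "0" then st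
  else if pvBeats q st.1 then ((some q.1, q.2), st.1)
  else if pvBeats q st.2 then (st.1, (some q.1, q.2))
  else st

def get_most_frequent_digits_alt (number : Int) : Option String × Int × Option String × Int :=
  let counts := ((PySem.Int.toStr number).toList.map (fun c => String.ofList [c])).foldl
      (fun d ch => d.insert ch (d.getD ch 0 + 1)) PySem.Dict.empty
  let r := counts.items.foldl pvTopStep ((none, 0), (none, 0))
  (r.1.1, r.1.2, r.2.1, r.2.2)

-- ===== PRECONDITION & SPEC =====
def Spec_get_most_frequent_digits (number : Int) (out : Option String × Int × Option String × Int) : Prop := out = get_most_frequent_digits_alt number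
instance (number : Int) (out : Option String × Int × Option String × Int) : Decidable (Spec_get_most_frequent_digits number out) := by unfold Spec_get_most_frequent_digits; infer_instance

-- ===== CLAIM (what is proved, stated in full; the proofs are below) =====
def Claim_equal_get_most_frequent_digits : Prop := ∀ (number : Int), Dom_get_most_frequent_digits number → Spec_get_most_frequent_digits number (get_most_frequent_digits number)

-- ===== LEMMAS AND PROOFS =====

-- the sort key of A, as one lexicographic value
def pvK (q : String × Int) : Lex (Int × String) := toLex ((-q.2 : Int), q.1)

-- the first two entries of a list, as B's loop state
def pvPack : List (String × Int) → (Option String × Int) × (Option String × Int)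
  | [] => ((none, 0), (none, 0))
  | [a] => ((some a.1, a.2), (none, 0))
  | a :: b :: _ => ((some a.1, a.2), (some b.1, b.2))

-- insertion into a (strictly) pvK-sorted list
def pvIns (x : String × Int) : List (String × Int) → List (String × Int)
  | [] => [x]
  | a :: t => if pvK x < pvK a then x :: a :: t else a :: pvIns x t

theorem pv_sorted2_eq_sorted_lex (xs : List (String × Int)) :
    PySem.List.sorted2 xs (fun x => -x.2) (fun x => x.1)
      = PySem.List.sorted xs pvK := by
  have hfg : (fun (a b : String × Int) => decide (-a.2 < -b.2) || (!decide (-b.2 < -a.2) && decide (a.1 < b.1)))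
      = fun (a b : String × Int) => decide (pvK a < pvK b) := by
    funext a b
    rw [Bool.eq_iff_iff]
    simp only [pvK, Bool.or_eq_true, Bool.and_eq_true, Bool.not_eq_true', decide_eq_true_iff,
      decide_eq_false_iff_not, Prod.Lex.lt_iff, ofLex_toLex]
    constructor
    · rintro (h | ⟨h1, h2⟩)
      · exact Or.inl h
      · by_cases hlt : (-a.2 : Int) < -b.2
        · exact Or.inl hlt
        · exact Or.inr ⟨by omega, h2⟩
    · rintro (h | ⟨h1, h2⟩)
      · exact Or.inl h
      · exact Or.inr ⟨by omega, h2⟩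
  rw [PySem.List.sorted_eq_foldl_insertBy]
  unfold PySem.List.sorted2
  simp only [if_neg (by decide : ¬ (false = true))]
  rw [hfg]

-- A's first loop returns the head of the '0'-filtered list
theorem pv_findX_eq (L : List (String × Int)) :
    pvFindX L = (match L.filter (fun q => q.1 != "0") with
      | [] => (none, 0)
      | q :: _ => (some q.1, q.2)) := by
  induction L with
  | nil => rfl
  | cons h t ih =>
    obtain ⟨d, c⟩ := h
    by_cases hd : d = "0" <;> simp [pvFindX, hd, ih]

-- A's second loop returns the head of the list filtered by both conditions
theorem pv_findY_eq (x : Option String) (L : List (String × Int)) :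
    pvFindY x L = (match L.filter (fun q => q.1 != "0" && some q.1 != x) with
      | [] => (none, 0)
      | q :: _ => (some q.1, q.2)) := by
  induction L with
  | nil => rfl
  | cons h t ih =>
    obtain ⟨d, c⟩ := h
    by_cases hd : d = "0"
    · simp [pvFindY, hd, ih]
    · by_cases hx : some d = x <;> simp [pvFindY, hd, hx, ih]

-- on a list with pairwise-distinct first components, A's two scans produce exactly
-- the first two entries of the '0'-filtered list
theorem pv_core (L : List (String × Int)) (hne : L.Pairwise (fun a b => a.1 ≠ b.1)) :
    ((pvFindX L).1, (pvFindX L).2, (pvFindY (pvFindX L).1 L).1, (pvFindY (pvFindX L).1 L).2)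
      = ((pvPack (L.filter (fun q => q.1 != "0"))).1.1, (pvPack (L.filter (fun q => q.1 != "0"))).1.2,
         (pvPack (L.filter (fun q => q.1 != "0"))).2.1, (pvPack (L.filter (fun q => q.1 != "0"))).2.2) := by
  rcases hf : L.filter (fun q => q.1 != "0") with _ | ⟨a, F'⟩
  · have hx : pvFindX L = (none, 0) := by rw [pv_findX_eq, hf]
    have hy : pvFindY (none : Option String) L = (none, 0) := by
      rw [pv_findY_eq]
      have : L.filter (fun q => q.1 != "0" && some q.1 != (none : Option String))
          = L.filter (fun q => q.1 != "0") := by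
        apply List.filter_congr
        intro q _
        simp
      rw [this, hf]
    simp [hx, hy, hf, pvPack]
  · have hx : pvFindX L = (some a.1, a.2) := by rw [pv_findX_eq, hf]
    have hfne : (L.filter (fun q => q.1 != "0")).Pairwise (fun a b => a.1 ≠ b.1) := hne.filter _
    rw [hf] at hfne
    have hyfilter : L.filter (fun q => q.1 != "0" && some q.1 != some a.1)
        = (L.filter (fun q => q.1 != "0")).filter (fun q => q.1 != a.1) := by
      rw [List.filter_filter]
      apply List.filter_congr
      intro q _
      rw [Bool.and_comm]
      rw [Bool.eq_iff_iff]
      simp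
    rcases F' with _ | ⟨b, F''⟩
    · have hy : pvFindY (some a.1) L = (none, 0) := by
        rw [pv_findY_eq, hyfilter, hf]
        simp
      simp [hx, hy, hf, pvPack]
    · have hab : a.1 ≠ b.1 := List.rel_of_pairwise_cons hfne (by simp)
      have hy : pvFindY (some a.1) L = (some b.1, b.2) := by
        rw [pv_findY_eq, hyfilter, hf]
        simp [Ne.symm hab]
      simp [hx, hy, hf, pvPack]

-- B's comparison against a filled slot is exactly the strict key order
theorem pv_beats_eq (q a : String × Int) : pvBeats q (some a.1, a.2) = decide (pvK q < pvK a) := by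
  rw [pvBeats]
  rw [Bool.eq_iff_iff]
  simp only [pvK, Bool.or_eq_true, Bool.and_eq_true, decide_eq_true_iff, beq_iff_eq,
    Prod.Lex.lt_iff, ofLex_toLex]
  constructor
  · rintro (h | ⟨h1, h2⟩)
    · exact Or.inl (by omega)
    · exact Or.inr ⟨by omega, h2⟩
  · rintro (h | ⟨h1, h2⟩)
    · exact Or.inl (by omega)
    · exact Or.inr ⟨by omega, h2⟩

-- one step of B's loop updates the first two entries exactly as inserting into the sorted list does
theorem pv_beats_none (q : String × Int) : pvBeats q ((none : Option String), (0 : Int)) = true := rfl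

theorem pv_step_pack (S : List (String × Int)) (x : String × Int) (hx : x.1 ≠ "0") :
    pvTopStep (pvPack S) x = pvPack (pvIns x S) := by
  have hx' : (x.1 == "0") = false := by simp [hx]
  have hstep : ∀ st, pvTopStep st x
      = if pvBeats x st.1 then ((some x.1, x.2), st.1)
        else if pvBeats x st.2 then (st.1, (some x.1, x.2)) else st := by
    intro st; simp [pvTopStep, hx']
  rcases S with _ | ⟨a, _ | ⟨b, t⟩⟩
  · simp [hstep, pvPack, pvIns, pv_beats_none]
  · by_cases h : pvK x < pvK a
    · simp [hstep, pvPack, pvIns, pv_beats_eq, h]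
    · simp [hstep, pvPack, pvIns, pv_beats_eq, pv_beats_none, h]
  · by_cases h : pvK x < pvK a
    · simp [hstep, pvPack, pvIns, pv_beats_eq, h]
    · by_cases h2 : pvK x < pvK b
      · simp [hstep, pvPack, pvIns, pv_beats_eq, h, h2]
      · simp [hstep, pvPack, pvIns, pv_beats_eq, h, h2]

-- B's whole loop over L, started on the first two of S, is the first two of inserting all of L into S
theorem pv_fold_pack (L : List (String × Int)) : ∀ S : List (String × Int),
    L.foldl pvTopStep (pvPack S)
      = pvPack (L.foldl (fun acc x => if x.1 == "0" then acc else pvIns x acc) S) := by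
  induction L with
  | nil => intro S; rfl
  | cons q L ih =>
    intro S
    rw [List.foldl_cons, List.foldl_cons]
    by_cases hq : q.1 = "0"
    · have h1 : pvTopStep (pvPack S) q = pvPack S := by simp [pvTopStep, hq]
      have h2 : (if q.1 == "0" then S else pvIns q S) = S := by simp [hq]
      rw [h1, h2]; exact ih S
    · have h2 : (if q.1 == "0" then S else pvIns q S) = pvIns q S := by simp [hq]
      rw [pv_step_pack S q hq, h2]; exact ih (pvIns q S)

theorem pv_mem_pvIns (x b : String × Int) (S : List (String × Int)) :
    b ∈ pvIns x S ↔ b = x ∨ b ∈ S := by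
  induction S with
  | nil => simp [pvIns]
  | cons a t ih =>
    by_cases h : pvK x < pvK a
    · simp [pvIns, h]
    · simp [pvIns, h, ih]
      tauto

theorem pv_pvIns_perm (x : String × Int) (S : List (String × Int)) :
    (pvIns x S).Perm (x :: S) := by
  induction S with
  | nil => simp [pvIns]
  | cons a t ih =>
    by_cases h : pvK x < pvK a
    · simp [pvIns, h]
    · simp only [pvIns, h, if_false]
      exact (ih.cons a).trans (List.Perm.swap x a t)

theorem pv_pvIns_pairwise (x : String × Int) (S : List (String × Int))
    (hS : S.Pairwise (fun a b => pvK a < pvK b)) (hx : ∀ a ∈ S, pvK x ≠ pvK a) :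
    (pvIns x S).Pairwise (fun a b => pvK a < pvK b) := by
  induction S with
  | nil => simp [pvIns]
  | cons a t ih =>
    rw [List.pairwise_cons] at hS
    by_cases h : pvK x < pvK a
    · simp only [pvIns, h, if_true]
      refine List.Pairwise.cons ?_ (List.Pairwise.cons hS.1 hS.2)
      intro b hb
      rcases List.mem_cons.mp hb with rfl | hb
      · exact h
      · exact h.trans (hS.1 b hb)
    · have hax : pvK a < pvK x :=
        lt_of_le_of_ne (not_lt.mp h) (fun he => hx a (by simp) he.symm)
      simp only [pvIns, h, if_false]
      refine List.Pairwise.cons ?_ (ih hS.2 (fun b hb => hx b (by simp [hb])))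
      intro b hb
      rcases (pv_mem_pvIns x b t).mp hb with rfl | hb
      · exact hax
      · exact hS.1 b hb

-- inserting a list L into S permutes to S plus the '0'-filtered L
theorem pv_foldl_ins_perm (L : List (String × Int)) : ∀ S : List (String × Int),
    (L.foldl (fun acc x => if x.1 == "0" then acc else pvIns x acc) S).Perm
      (S ++ L.filter (fun q => q.1 != "0")) := by
  induction L with
  | nil => intro S; simp
  | cons q L ih =>
    intro S
    rw [List.foldl_cons]
    by_cases hq : q.1 = "0"
    · have h2 : (if q.1 == "0" then S else pvIns q S) = S := by simp [hq]
      rw [h2]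
      simpa [hq] using ih S
    · have h2 : (if q.1 == "0" then S else pvIns q S) = pvIns q S := by simp [hq]
      have h3 : (q :: L).filter (fun q => q.1 != "0") = q :: L.filter (fun q => q.1 != "0") := by
        simp [hq]
      rw [h2, h3]
      refine (ih (pvIns q S)).trans ?_
      have h1 : (pvIns q S ++ L.filter (fun q => q.1 != "0")).Perm
          (q :: (S ++ L.filter (fun q => q.1 != "0"))) :=
        (pv_pvIns_perm q S).append_right _
      exact h1.trans List.perm_middle.symm

-- inserting pairwise-first-distinct entries keeps the strict sortedness
theorem pv_foldl_ins_pairwise (L : List (String × Int)) : ∀ S : List (String × Int),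
    S.Pairwise (fun a b => pvK a < pvK b) → (∀ q ∈ L, ∀ a ∈ S, q.1 ≠ a.1) →
    L.Pairwise (fun a b => a.1 ≠ b.1) →
    (L.foldl (fun acc x => if x.1 == "0" then acc else pvIns x acc) S).Pairwise
      (fun a b => pvK a < pvK b) := by
  induction L with
  | nil => intro S hS _ _; simpa using hS
  | cons q L ih =>
    intro S hS hcross hL
    rw [List.pairwise_cons] at hL
    rw [List.foldl_cons]
    by_cases hq : q.1 = "0"
    · have h2 : (if q.1 == "0" then S else pvIns q S) = S := by simp [hq]
      rw [h2]
      exact ih S hS (fun p hp a ha => hcross p (by simp [hp]) a ha) hL.2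
    · have h2 : (if q.1 == "0" then S else pvIns q S) = pvIns q S := by simp [hq]
      rw [h2]
      have hKne : ∀ a ∈ S, pvK q ≠ pvK a := by
        intro a ha he
        have : q.1 = a.1 := congrArg (fun z => (ofLex z).2) he
        exact hcross q (by simp) a ha this
      refine ih (pvIns q S) (pv_pvIns_pairwise q S hS hKne) ?_ hL.2
      intro p hp a ha
      rcases (pv_mem_pvIns q a S).mp ha with rfl | ha
      · exact (hL.1 p hp).symm
      · exact hcross p (by simp [hp]) a ha

theorem pv_main (number : Int) : get_most_frequent_digits number = get_most_frequent_digits_alt number := by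
  unfold get_most_frequent_digits get_most_frequent_digits_alt
  simp only
  rw [pv_sorted2_eq_sorted_lex]
  set cs := (PySem.Int.toStr number).toList.map (fun c => String.ofList [c]) with hcs
  rw [PySem.Dict.foldl_insert_getD_add_one_eq_counter]
  set items := (PySem.Dict.counter cs).items with hitems
  set L := PySem.List.sorted items pvK with hL
  -- counter items have pairwise-distinct first components
  have hfstnd : (items.map Prod.fst).Nodup := by
    rw [hitems, PySem.Dict.items_counter, List.map_map]
    have hcomp : (Prod.fst ∘ fun k : String => (k, (List.count k cs : Int))) = id := rfl
    rw [hcomp, List.map_id]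
    exact PySem.Set.nodup_ofList cs
  have hine : items.Pairwise (fun a b => a.1 ≠ b.1) := List.pairwise_map.mp hfstnd
  have hperm : L.Perm items := PySem.List.sorted_perm items pvK false
  have hLfstnd : (L.map Prod.fst).Nodup := ((hperm.map Prod.fst).nodup_iff).mpr hfstnd
  have hLne : L.Pairwise (fun a b => a.1 ≠ b.1) := List.pairwise_map.mp hLfstnd
  have hle : L.Pairwise (fun a b => pvK a ≤ pvK b) := PySem.List.sorted_pairwise items pvK
  have hLlt : L.Pairwise (fun a b => pvK a < pvK b) := by
    refine (hle.and hLne).imp ?_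
    rintro a b ⟨h1, h2⟩
    refine lt_of_le_of_ne h1 (fun hk => h2 ?_)
    exact congrArg (fun z => (ofLex z).2) hk
  -- B's loop state is the first two entries of the strictly sorted '0'-filtered items,
  -- which equal the '0'-filtered sorted items
  set G := items.foldl (fun acc x => if x.1 == "0" then acc else pvIns x acc) [] with hG
  have hGperm : G.Perm (items.filter (fun q => q.1 != "0")) := by
    have h := pv_foldl_ins_perm items []
    rwa [List.nil_append] at h
  have hGpw : G.Pairwise (fun a b => pvK a < pvK b) :=
    pv_foldl_ins_pairwise items [] (by simp) (by simp) hine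
  have hFs : PySem.List.sorted (items.filter (fun q => q.1 != "0")) pvK
      = L.filter (fun q => q.1 != "0") :=
    PySem.List.sorted_eq_of_perm_of_pairwise_lt _ _ pvK (hperm.filter _) (hLlt.filter _)
  have hGsorted : PySem.List.sorted (items.filter (fun q => q.1 != "0")) pvK = G :=
    PySem.List.sorted_eq_of_perm_of_pairwise_lt _ _ pvK hGperm hGpw
  have hGL : G = L.filter (fun q => q.1 != "0") := hGsorted ▸ hFs
  have hfold : items.foldl pvTopStep (((none, 0), (none, 0)) : (Option String × Int) × (Option String × Int))
      = pvPack (items.foldl (fun acc x => if x.1 == "0" then acc else pvIns x acc) []) :=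
    pv_fold_pack items []
  rw [hfold, ← hG, hGL]
  exact pv_core L hLne

-- ===== VERDICT (by name: the statement is the Claim_ definition above) =====
theorem get_most_frequent_digits_spec : Claim_equal_get_most_frequent_digits := by
  intro number _
  unfold Spec_get_most_frequent_digits
  exact pv_main number
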